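-- pv_equiv track=rewrite | github.com/CHE10X/acme-ops | bonfire/optimizer/optimizer.py | determine_tier
-- ===== SOURCE A (Python) =====
-- from typing import Any, Dict
--
-- def _coerce_int(value: Any, default: int = 0) -> int:
--     try:
--         value = int(value)
--         if value < 0:
--             return default
--         return value
--     except Exception:
--         return default
--
-- def _coerce_str(value: Any, default: str = "") -> str:
--     try:
--         value = str(value)
--     except Exception:
--         return default
--     return value.strip() or default
--
-- def determine_tier(predicted_tokens: int, lane: str, prompt: str = "") -> str:
--     """Classify expected request work into a routing tier."""
--     lane = _coerce_str(lane, "interactive")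
--     tokens = _coerce_int(predicted_tokens, 0)
--     prompt_l = _coerce_str(prompt, "").lower()
--
--     if lane == "system":
--         return "large"
--     if lane == "background":
--         if tokens >= 6000:
--             return "medium"
--         return "small"
--
--     if tokens >= 9000 or any(word in prompt_l for word in ("analysis", "architecture", "design", "synthesize", "incident")):
--         return "large"
--     if tokens >= 3000 or any(word in prompt_l for word in ("plan", "investigate", "debug", "reason")):
--         return "medium"
--     return "small"
-- ===== SOURCE B (Python) =====
-- from typing import Any
--
-- def _coerce_int(value: Any, default: int = 0) -> int:
--     try:
--         value = int(value)
--         if value < 0: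
--             return default
--         return value
--     except Exception:
--         return default
--
-- def _coerce_str(value: Any, default: str = "") -> str:
--     try:
--         value = str(value)
--     except Exception:
--         return default
--     return value.strip() or default
--
-- _TIERS = ("small", "medium", "large")
-- _THRESHOLDS = (3000, 9000)
-- _KEYWORD_RANK = {
--     "analysis": 2, "architecture": 2, "design": 2, "synthesize": 2, "incident": 2,
--     "plan": 1, "investigate": 1, "debug": 1, "reason": 1,
-- }
--
-- def determine_tier(predicted_tokens: int, lane: str, prompt: str = "") -> str:
--     """Classify expected request work into a routing tier (numeric rank scoring)."""
--     lane = _coerce_str(lane, "interactive")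
--     tokens = _coerce_int(predicted_tokens, 0)
--     prompt_l = _coerce_str(prompt, "").lower()
--
--     if lane == "system":
--         return "large"
--     if lane == "background":
--         return "medium" if tokens >= 6000 else "small"
--
--     rank = sum(1 for t in _THRESHOLDS if tokens >= t)
--     for word, r in _KEYWORD_RANK.items():
--         if word in prompt_l:
--             rank = max(rank, r)
--     return _TIERS[rank]
-- ===== Notes on version B (the rewrite author's own statement) =====
-- stated objective: alternative
-- what changed: The interactive path's first-match if-cascade is replaced by numeric scoring: a rank 0-2 is computed as the max of a threshold count over (3000, 9000) and keyword ranks from a word->rank dict, and the tier name is looked up by indexing a tier tuple.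
import Mathlib
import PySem

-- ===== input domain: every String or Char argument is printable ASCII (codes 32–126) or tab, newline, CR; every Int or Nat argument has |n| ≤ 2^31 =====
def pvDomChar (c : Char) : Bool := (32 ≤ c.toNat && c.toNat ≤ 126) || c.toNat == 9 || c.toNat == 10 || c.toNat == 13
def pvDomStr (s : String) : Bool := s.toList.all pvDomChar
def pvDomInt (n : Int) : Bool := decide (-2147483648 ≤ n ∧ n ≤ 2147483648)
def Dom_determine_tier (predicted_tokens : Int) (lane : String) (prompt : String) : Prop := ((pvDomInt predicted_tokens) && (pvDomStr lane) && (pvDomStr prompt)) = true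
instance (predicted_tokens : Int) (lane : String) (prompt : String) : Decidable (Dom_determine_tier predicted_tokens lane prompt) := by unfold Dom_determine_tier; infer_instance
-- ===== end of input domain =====

-- B replaces A's interactive-path if-cascade by numeric rank scoring (max of a threshold count and keyword ranks) indexed into a tier table (objective: alternative).


-- ===== PORT A =====
-- _coerce_int on an int argument: int(value) is the identity, negatives give the default
def pvACoerceInt (value : Int) (default : Int) : Int :=
  if value < 0 then default else value

-- _coerce_str on a str argument: str(value) is the identity; `value.strip() or default`
def pvACoerceStr (value : String) (default : String) : String :=
  if PySem.Str.strip value = "" then default else PySem.Str.strip value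

def determine_tier (predicted_tokens : Int) (lane : String) (prompt : String) : String :=
  let lane' := pvACoerceStr lane "interactive"
  let tokens := pvACoerceInt predicted_tokens 0
  let prompt_l := PySem.Str.lower (pvACoerceStr prompt "")
  if lane' = "system" then "large"
  else if lane' = "background" then
    if tokens ≥ 6000 then "medium" else "small"
  else if tokens ≥ 9000 ∨ (["analysis", "architecture", "design", "synthesize", "incident"].any (fun word => PySem.Str.isIn word prompt_l)) then "large"
  else if tokens ≥ 3000 ∨ (["plan", "investigate", "debug", "reason"].any (fun word => PySem.Str.isIn word prompt_l)) then "medium"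
  else "small"

-- ===== PORT B =====
def pvBTiers : List String := ["small", "medium", "large"]
def pvBThresholds : List Int := [3000, 9000]
def pvBKeywordRank : List (String × Int) :=
  [ ("analysis", 2), ("architecture", 2), ("design", 2), ("synthesize", 2), ("incident", 2),
    ("plan", 1), ("investigate", 1), ("debug", 1), ("reason", 1) ]

def determine_tier_alt (predicted_tokens : Int) (lane : String) (prompt : String) : String :=
  let lane' := pvACoerceStr lane "interactive"
  let tokens := pvACoerceInt predicted_tokens 0
  let prompt_l := PySem.Str.lower (pvACoerceStr prompt "")
  if lane' = "system" then "large"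
  else if lane' = "background" then
    (if tokens ≥ 6000 then "medium" else "small")
  else
    -- rank = sum(1 for t in _THRESHOLDS if tokens >= t)
    let rank0 := pvBThresholds.foldl (fun acc t => if tokens ≥ t then acc + 1 else acc) (0 : Int)
    -- for word, r in _KEYWORD_RANK.items(): if word in prompt_l: rank = max(rank, r)
    let rank := pvBKeywordRank.foldl (fun acc wr => if PySem.Str.isIn wr.1 prompt_l then max acc wr.2 else acc) rank0
    -- _TIERS[rank]; rank is always in range, so the IndexError default is never used
    (PySem.List.pyGet? pvBTiers rank).getD ""

-- ===== PRECONDITION & SPEC =====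
def Spec_determine_tier (predicted_tokens : Int) (lane : String) (prompt : String) (out : String) : Prop := out = determine_tier_alt predicted_tokens lane prompt
instance (predicted_tokens : Int) (lane : String) (prompt : String) (out : String) : Decidable (Spec_determine_tier predicted_tokens lane prompt out) := by unfold Spec_determine_tier; infer_instance

-- ===== CLAIM (what is proved, stated in full; the proofs are below) =====
def Claim_equal_determine_tier : Prop := ∀ (predicted_tokens : Int) (lane : String) (prompt : String), Dom_determine_tier predicted_tokens lane prompt → Spec_determine_tier predicted_tokens lane prompt (determine_tier predicted_tokens lane prompt)

-- ===== LEMMAS AND PROOFS =====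
-- The interactive path: the cascade equals the rank-table lookup, for any membership booleans.
theorem pv_interactive_eq (tokens : Int) (p : String) :
    (if tokens ≥ 9000 ∨ (["analysis", "architecture", "design", "synthesize", "incident"].any (fun word => PySem.Str.isIn word p)) then "large"
     else if tokens ≥ 3000 ∨ (["plan", "investigate", "debug", "reason"].any (fun word => PySem.Str.isIn word p)) then "medium"
     else "small")
    = (PySem.List.pyGet? pvBTiers
        (pvBKeywordRank.foldl (fun acc wr => if PySem.Str.isIn wr.1 p then max acc wr.2 else acc)
          (pvBThresholds.foldl (fun acc t => if tokens ≥ t then acc + 1 else acc) (0 : Int)))).getD "" := by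
  simp only [pvBTiers, pvBThresholds, pvBKeywordRank, List.foldl, List.any_cons, List.any_nil]
  by_cases h9 : tokens ≥ 9000 <;> by_cases h3 : tokens ≥ 3000
  all_goals first
    | omega
    | (simp only [h9, h3, if_pos]
       generalize PySem.Str.isIn "analysis" p = a1
       generalize PySem.Str.isIn "architecture" p = a2
       generalize PySem.Str.isIn "design" p = a3
       generalize PySem.Str.isIn "synthesize" p = a4
       generalize PySem.Str.isIn "incident" p = a5
       generalize PySem.Str.isIn "plan" p = m1
       generalize PySem.Str.isIn "investigate" p = m2
       generalize PySem.Str.isIn "debug" p = m3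
       generalize PySem.Str.isIn "reason" p = m4
       revert a1 a2 a3 a4 a5 m1 m2 m3 m4
       decide)

-- ===== VERDICT (by name: the statement is the Claim_ definition above) =====
theorem determine_tier_spec : Claim_equal_determine_tier := by
  intro predicted_tokens lane prompt _
  unfold Spec_determine_tier determine_tier determine_tier_alt
  by_cases hs : pvACoerceStr lane "interactive" = "system"
  · simp [hs]
  · by_cases hb : pvACoerceStr lane "interactive" = "background"
    · simp [hb]
    · simp only [hs, hb, if_false]
      exact pv_interactive_eq _ _
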